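-- pv_equiv track=rewrite | github.com/Nickzster/Lua-Projects-for-Halo | v2/lua.py | isValidFile
-- ===== SOURCE A (Python) =====
-- def isValidFile(fileName):
--     modifiedFile = fileName.split(".")
--     for item in modifiedFile:
--         if item == "test":
--             return False
--         if item == "lua":
--             return True
--     return False
-- ===== SOURCE B (Python) =====
-- def isValidFile(fileName):
--     tokens = fileName.split(".")
--     if "lua" not in tokens:
--         return False
--     l = tokens.index("lua")
--     t = tokens.index("test") if "test" in tokens else len(tokens)
--     return l < t
-- ===== Notes on version B (the rewrite author's own statement) =====
-- stated objective: alternative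
-- what changed: Replaces the single early-returning scan with an index-first decomposition: find the first positions of 'lua' and 'test' among the dot-separated tokens and compare them.
import Mathlib
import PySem

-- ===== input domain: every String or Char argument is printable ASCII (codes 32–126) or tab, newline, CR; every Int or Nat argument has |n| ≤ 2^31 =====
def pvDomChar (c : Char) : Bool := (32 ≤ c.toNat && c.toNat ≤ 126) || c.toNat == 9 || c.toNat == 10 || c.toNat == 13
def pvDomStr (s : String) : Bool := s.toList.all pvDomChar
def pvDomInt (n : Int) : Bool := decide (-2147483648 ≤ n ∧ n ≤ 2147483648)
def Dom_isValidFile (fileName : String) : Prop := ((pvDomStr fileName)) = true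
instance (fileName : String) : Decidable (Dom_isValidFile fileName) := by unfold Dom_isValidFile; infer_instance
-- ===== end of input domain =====

-- B replaces A's early-returning scan by an index-first decomposition (find first positions of 'lua'/'test', compare); same cost, alternative structure.

-- ===== PORT A =====
-- A's for-loop with early returns, as structural recursion over the tokens
def isValidFileScan : List String → Bool
  | [] => false
  | item :: rest =>
    if item = "test" then false
    else if item = "lua" then true
    else isValidFileScan rest

def isValidFile (fileName : String) : Bool :=
  isValidFileScan ((PySem.Str.split? fileName ".").getD [])

-- ===== PORT B =====
def isValidFile_alt (fileName : String) : Bool :=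
  let tokens := (PySem.Str.split? fileName ".").getD []
  if "lua" ∈ tokens then
    let l := (PySem.List.index? tokens "lua").getD 0
    let t := if "test" ∈ tokens then (PySem.List.index? tokens "test").getD 0 else tokens.length
    decide (l < t)
  else false

-- ===== PRECONDITION & SPEC =====
def Spec_isValidFile (fileName : String) (out : Bool) : Prop := out = isValidFile_alt fileName
instance (fileName : String) (out : Bool) : Decidable (Spec_isValidFile fileName out) := by unfold Spec_isValidFile; infer_instance

-- ===== CLAIM (what is proved, stated in full; the proofs are below) =====
def Claim_equal_isValidFile : Prop := ∀ (fileName : String), Dom_isValidFile fileName → Spec_isValidFile fileName (isValidFile fileName)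

-- ===== LEMMAS AND PROOFS =====
theorem scan_eq_indices (ts : List String) :
    isValidFileScan ts =
      (if "lua" ∈ ts then
        decide (((PySem.List.index? ts "lua").getD 0) <
          (if "test" ∈ ts then (PySem.List.index? ts "test").getD 0 else ts.length))
      else false) := by
  induction ts with
  | nil => simp [isValidFileScan]
  | cons item rest ih =>
    by_cases htest : item = "test"
    · subst htest
      simp only [isValidFileScan]
      rw [if_pos trivial]
      by_cases hlua : "lua" ∈ ("test" :: rest)
      · rw [if_pos hlua, if_pos (List.mem_cons_self ..)]
        rw [PySem.List.index?_cons_self]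
        have hne : "test" ≠ "lua" := by decide
        rw [PySem.List.index?_cons_of_ne rest hne]
        cases h : PySem.List.index? rest "lua" with
        | none =>
          exfalso
          have := (PySem.List.index?_eq_none_iff (xs := rest) (v := "lua")).mp h
          rcases List.mem_cons.mp hlua with h1 | h2
          · exact hne h1.symm
          · exact this h2
        | some k => simp
      · rw [if_neg hlua]
    · by_cases hlua : item = "lua"
      · subst hlua
        simp only [isValidFileScan]
        rw [if_pos trivial, if_pos (List.mem_cons_self ..)]
        rw [PySem.List.index?_cons_self]
        by_cases ht : "test" ∈ ("lua" :: rest)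
        · rw [if_pos ht]
          have hne : "lua" ≠ "test" := by decide
          rw [PySem.List.index?_cons_of_ne rest hne]
          cases h : PySem.List.index? rest "test" with
          | none =>
            exfalso
            have := (PySem.List.index?_eq_none_iff (xs := rest) (v := "test")).mp h
            rcases List.mem_cons.mp ht with h1 | h2
            · exact hne h1.symm
            · exact this h2
          | some k => simp
        · rw [if_neg ht]
          simp
      · -- item is neither "test" nor "lua": both positions shift by one
        simp only [isValidFileScan, if_neg htest, if_neg hlua]
        rw [ih]
        have hmemL : ("lua" ∈ item :: rest) ↔ ("lua" ∈ rest) := by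
          constructor
          · intro h; rcases List.mem_cons.mp h with h1 | h2
            · exact absurd h1.symm hlua
            · exact h2
          · exact fun h => List.mem_cons_of_mem _ h
        have hmemT : ("test" ∈ item :: rest) ↔ ("test" ∈ rest) := by
          constructor
          · intro h; rcases List.mem_cons.mp h with h1 | h2
            · exact absurd h1.symm htest
            · exact h2
          · exact fun h => List.mem_cons_of_mem _ h
        by_cases hL : "lua" ∈ rest
        · rw [if_pos hL, if_pos (hmemL.mpr hL)]
          have hneL : item ≠ "lua" := hlua
          rw [PySem.List.index?_cons_of_ne rest hneL]
          cases hl : PySem.List.index? rest "lua" with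
          | none =>
            exact absurd hL ((PySem.List.index?_eq_none_iff (xs := rest) (v := "lua")).mp hl)
          | some l =>
            by_cases hT : "test" ∈ rest
            · rw [if_pos hT, if_pos (hmemT.mpr hT)]
              rw [PySem.List.index?_cons_of_ne rest htest]
              cases htix : PySem.List.index? rest "test" with
              | none =>
                exact absurd hT ((PySem.List.index?_eq_none_iff (xs := rest) (v := "test")).mp htix)
              | some t => simp
            · rw [if_neg hT, if_neg (fun h => hT (hmemT.mp h))]
              simp
        · rw [if_neg hL, if_neg (fun h => hL (hmemL.mp h))]

-- ===== VERDICT (by name: the statement is the Claim_ definition above) =====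
theorem isValidFile_spec : Claim_equal_isValidFile := by
  intro fileName _
  unfold Spec_isValidFile isValidFile isValidFile_alt
  exact scan_eq_indices _
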